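-- pv_equiv track=rewrite | github.com/temmanuel-L/NLP | algorithm.py | corpus_big_tfidf_flat_sort
-- ===== SOURCE A (Python) =====
-- def corpus_big_tfidf_flat_sort(corpus_big_tfidf):
--     # 该函数将corpu_big_tfidf中每篇文章的所有词向量都放到一个列表里，即从双层列表下降为一层列表
--     # 以进行按词序的groupby，以对词权重作进一步分化处理
--     word_vec_concat_list = []
--     for doc_vec in corpus_big_tfidf:
--         for word_vec in doc_vec:
--             word_vec_concat_list.append(word_vec)
--
--     # 将展开后的一维列表，按词序由小到大排序
--     word_vec_concat_list_sort = sorted(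
--         word_vec_concat_list, key=lambda x: (x[0]), reverse=False)
--
--     return word_vec_concat_list_sort
-- ===== SOURCE B (Python) =====
-- def _merge(a, b):
--     # stable two-way merge by word key; ties favour the left list
--     out = []
--     i = j = 0
--     while i < len(a) and j < len(b):
--         if b[j][0] < a[i][0]:
--             out.append(b[j]); j += 1
--         else:
--             out.append(a[i]); i += 1
--     out.extend(a[i:])
--     out.extend(b[j:])
--     return out
--
--
-- def corpus_big_tfidf_flat_sort(corpus_big_tfidf):
--     # sort each document's word vectors once, then stably merge the sorted runs
--     acc = []
--     for doc_vec in corpus_big_tfidf: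
--         acc = _merge(acc, sorted(doc_vec, key=lambda x: x[0]))
--     return acc
-- ===== Notes on version B (the rewrite author's own statement) =====
-- stated objective: alternative
-- what changed: Instead of flattening all documents into one list and doing a single global sort, B sorts each document's word-vector list separately and combines the sorted runs with a stable left-preferring two-way merge; a global stable sort equals the stable merge of per-document stable sorts.
import Mathlib
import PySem

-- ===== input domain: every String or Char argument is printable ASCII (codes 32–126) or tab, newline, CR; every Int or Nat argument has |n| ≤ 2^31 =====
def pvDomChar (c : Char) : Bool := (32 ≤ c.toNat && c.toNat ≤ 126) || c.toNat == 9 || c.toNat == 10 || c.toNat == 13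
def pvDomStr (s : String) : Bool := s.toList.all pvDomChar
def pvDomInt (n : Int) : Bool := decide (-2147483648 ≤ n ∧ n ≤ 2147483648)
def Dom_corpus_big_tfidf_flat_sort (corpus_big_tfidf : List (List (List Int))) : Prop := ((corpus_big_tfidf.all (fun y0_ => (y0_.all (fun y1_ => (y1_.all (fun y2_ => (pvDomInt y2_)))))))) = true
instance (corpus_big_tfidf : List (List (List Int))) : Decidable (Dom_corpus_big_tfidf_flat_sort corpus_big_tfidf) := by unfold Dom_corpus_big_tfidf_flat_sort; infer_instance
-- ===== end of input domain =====

-- B replaces A's flatten-then-global-sort by per-document stable sorts combined with a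
-- stable left-preferring two-way merge (alternative decomposition, same result).


-- ===== PORT A =====
-- key=lambda x: x[0]; x[0] is total here because Pre_ requires every word vector nonempty
def pvKey (x : List Int) : Int := PySem.List.pyGetD x 0 0

def corpus_big_tfidf_flat_sort (corpus_big_tfidf : List (List (List Int))) : List (List Int) :=
  -- the two nested append loops building word_vec_concat_list
  let word_vec_concat_list :=
    corpus_big_tfidf.foldl
      (fun acc doc_vec => doc_vec.foldl (fun acc2 word_vec => acc2 ++ [word_vec]) acc) []
  -- sorted(word_vec_concat_list, key=lambda x: x[0], reverse=False)
  PySem.List.sorted word_vec_concat_list pvKey false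

-- ===== PORT B =====
-- the two-pointer while loop of _merge, as recursion on the two remaining suffixes
def pvMerge (a b : List (List Int)) : List (List Int) :=
  match a, b with
  | [], b => b
  | a, [] => a
  | x :: a', y :: b' =>
      if pvKey y < pvKey x then y :: pvMerge (x :: a') b' else x :: pvMerge a' (y :: b')

def corpus_big_tfidf_flat_sort_alt (corpus_big_tfidf : List (List (List Int))) : List (List Int) :=
  corpus_big_tfidf.foldl
    (fun acc doc_vec => pvMerge acc (PySem.List.sorted doc_vec pvKey false)) []

-- ===== PRECONDITION & SPEC =====
-- Pre_ excludes exactly the inputs on which Python A raises: a corpus containing an empty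
-- word vector makes the sort key x[0] raise IndexError (B raises there too).
def Pre_corpus_big_tfidf_flat_sort (corpus_big_tfidf : List (List (List Int))) : Prop :=
  ∀ doc ∈ corpus_big_tfidf, ∀ wv ∈ doc, wv ≠ []
instance (corpus_big_tfidf : List (List (List Int))) : Decidable (Pre_corpus_big_tfidf_flat_sort corpus_big_tfidf) := by unfold Pre_corpus_big_tfidf_flat_sort; infer_instance
def pvWitness_corpus_big_tfidf_flat_sort : List (List (List Int)) := [[[1, 2], [0, 5]], [[1, 3]], []]

def Spec_corpus_big_tfidf_flat_sort (corpus_big_tfidf : List (List (List Int))) (out : List (List Int)) : Prop := out = corpus_big_tfidf_flat_sort_alt corpus_big_tfidf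
instance (corpus_big_tfidf : List (List (List Int))) (out : List (List Int)) : Decidable (Spec_corpus_big_tfidf_flat_sort corpus_big_tfidf out) := by unfold Spec_corpus_big_tfidf_flat_sort; infer_instance

-- ===== CLAIM (what is proved, stated in full; the proofs are below) =====
def Claim_equal_corpus_big_tfidf_flat_sort : Prop := ∀ (corpus_big_tfidf : List (List (List Int))), Dom_corpus_big_tfidf_flat_sort corpus_big_tfidf → Pre_corpus_big_tfidf_flat_sort corpus_big_tfidf → Spec_corpus_big_tfidf_flat_sort corpus_big_tfidf (corpus_big_tfidf_flat_sort corpus_big_tfidf)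

-- ===== LEMMAS AND PROOFS =====

-- the insertion step of PySem.List.sorted with our key
def pvIns (acc : List (List Int)) (x : List Int) : List (List Int) :=
  PySem.List.insertBy (fun a b => decide (pvKey a < pvKey b)) x acc

theorem pvInsertBy_singleton (y : List Int) (a : List (List Int)) :
    PySem.List.insertBy (fun a b => decide (pvKey a < pvKey b)) y a = pvMerge a [y] := by
  induction a with
  | nil => simp [PySem.List.insertBy, pvMerge]
  | cons z zs ih =>
      by_cases h : pvKey y < pvKey z
      · simp [PySem.List.insertBy, pvMerge, h]
      · simp [PySem.List.insertBy, pvMerge, h, ih]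

-- stable insertion commutes with the stable left-preferring merge
theorem pvInsertBy_merge (y : List Int) (b a : List (List Int)) :
    PySem.List.insertBy (fun p q => decide (pvKey p < pvKey q)) y (pvMerge a b) =
      pvMerge a (PySem.List.insertBy (fun p q => decide (pvKey p < pvKey q)) y b) := by
  induction b generalizing a with
  | nil =>
      cases a with
      | nil => simp [pvMerge, PySem.List.insertBy]
      | cons x a' => simpa [pvMerge, PySem.List.insertBy] using pvInsertBy_singleton y (x :: a')
  | cons z zs ihb =>
      induction a with
      | nil => simp [pvMerge]
      | cons x a' iha =>
          by_cases h1 : pvKey z < pvKey x <;> by_cases h2 : pvKey y < pvKey z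
          · have h3 : pvKey y < pvKey x := by omega
            simp [pvMerge, PySem.List.insertBy, h1, h2, h3]
          · simp [pvMerge, PySem.List.insertBy, h1, h2, ihb (x :: a')]
          · by_cases h3 : pvKey y < pvKey x
            · simp [pvMerge, PySem.List.insertBy, h1, h2, h3]
            · have iha' := iha
              simp [PySem.List.insertBy, h2] at iha'
              simp [pvMerge, PySem.List.insertBy, h1, h2, h3, iha']
          · have h3 : ¬ pvKey y < pvKey x := by omega
            have iha' := iha
            simp [PySem.List.insertBy, h2] at iha'
            simp [pvMerge, PySem.List.insertBy, h1, h2, h3, iha']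

theorem pvFoldlIns_merge (ys b a : List (List Int)) :
    List.foldl pvIns (pvMerge a b) ys = pvMerge a (List.foldl pvIns b ys) := by
  induction ys generalizing b with
  | nil => rfl
  | cons y ys ih =>
      simp only [List.foldl_cons]
      rw [show pvIns (pvMerge a b) y =
            pvMerge a (pvIns b y) from pvInsertBy_merge y b a, ih]

theorem pvMerge_nil_right (a : List (List Int)) : pvMerge a [] = a := by
  cases a <;> simp [pvMerge]

-- A's flattening loop appends the documents in order
theorem pvConcat_eq (corpus : List (List (List Int))) (init : List (List Int)) :
    corpus.foldl (fun acc doc => doc.foldl (fun acc2 wv => acc2 ++ [wv]) acc) init =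
      init ++ corpus.flatten := by
  induction corpus generalizing init with
  | nil => simp
  | cons d ds ih =>
      rw [List.foldl_cons, PySem.List.foldl_append_singleton, ih, List.flatten_cons,
        List.append_assoc]

theorem pvMain (corpus : List (List (List Int))) :
    corpus_big_tfidf_flat_sort corpus = corpus_big_tfidf_flat_sort_alt corpus := by
  suffices h : ∀ cs : List (List (List Int)),
      List.foldl pvIns [] cs.flatten =
        cs.foldl (fun acc doc => pvMerge acc (PySem.List.sorted doc pvKey false)) [] by
    simp only [corpus_big_tfidf_flat_sort, corpus_big_tfidf_flat_sort_alt, pvConcat_eq,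
      List.nil_append, PySem.List.sorted_eq_foldl_insertBy]
    exact h corpus
  intro cs
  induction cs using List.reverseRecOn with
  | nil => rfl
  | append_singleton ds d ih =>
      rw [List.flatten_append, List.flatten_cons, List.flatten_nil, List.append_nil,
        List.foldl_append, ih, List.foldl_append]
      rw [← pvMerge_nil_right (ds.foldl (fun acc doc => pvMerge acc (PySem.List.sorted doc pvKey false)) [])]
      rw [pvFoldlIns_merge]
      simp only [PySem.List.sorted_eq_foldl_insertBy, pvMerge_nil_right]
      rfl

-- ===== VERDICT (by name: the statement is the Claim_ definition above) =====
theorem corpus_big_tfidf_flat_sort_spec : Claim_equal_corpus_big_tfidf_flat_sort := by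
  intro corpus _ _
  unfold Spec_corpus_big_tfidf_flat_sort
  exact pvMain corpus
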